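-- pv_equiv track=rewrite | github.com/jyukipann/YOLOX | minimal_set/calc_iou_csv.py | gen_img_id_index
-- ===== SOURCE A (Python) =====
-- def gen_img_id_index(ids):
--     target_image_index = {}
--     for i,img_id in enumerate(ids):
--         try:
--             target_image_index[int(img_id)].append(i)
--         except:
--             target_image_index[int(img_id)] = [i]
--     return target_image_index
-- ===== SOURCE B (Python) =====
-- def gen_img_id_index(ids):
--     # For each distinct id (in first-occurrence order), scan the whole list
--     # once and collect every position holding that id.
--     vals = [int(x) for x in ids]
--     return {k: [i for i, v in enumerate(vals) if v == k]
--             for k in dict.fromkeys(vals)}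
-- ===== Notes on version B (the rewrite author's own statement) =====
-- stated objective: simpler
-- what changed: B replaces A's single-pass dict accumulation with try/except by a two-level comprehension: deduplicate the int ids, then for each distinct id scan the list and collect the matching positions (O(n*k) nested scan instead of O(n) hash accumulation).
import Mathlib
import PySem

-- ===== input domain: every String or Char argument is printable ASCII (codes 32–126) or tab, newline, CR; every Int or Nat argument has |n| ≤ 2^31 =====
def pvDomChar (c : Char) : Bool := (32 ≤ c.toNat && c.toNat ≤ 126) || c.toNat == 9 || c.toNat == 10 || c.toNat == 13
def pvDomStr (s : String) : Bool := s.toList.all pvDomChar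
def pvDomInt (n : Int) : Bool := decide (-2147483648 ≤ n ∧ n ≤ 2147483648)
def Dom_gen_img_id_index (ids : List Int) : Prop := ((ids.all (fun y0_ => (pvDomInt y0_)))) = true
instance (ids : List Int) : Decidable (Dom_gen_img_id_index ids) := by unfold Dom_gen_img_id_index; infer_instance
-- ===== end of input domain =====

-- B groups indices by a nested scan: deduplicated ids, and per id one scan collecting positions —
-- plainer than A's try/except dict accumulation, not faster.

-- ===== PORT A =====
-- for i,img_id in enumerate(ids): try d[img_id].append(i) except: d[img_id] = [i]
-- (append-or-create on a dict entry is exactly Dict.modify with default [])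
def gen_img_id_index (ids : List Int) : List (Int × List Int) :=
  ((PySem.List.enumerate ids).foldl
    (fun d p => d.modify p.2 [] (fun l => l ++ [p.1])) PySem.Dict.empty).items

-- ===== PORT B =====
-- {k: [i for i,v in enumerate(vals) if v == k] for k in dict.fromkeys(vals)}
-- (dict.fromkeys keeps the distinct values in first-occurrence order = PySem.List.dedup)
def gen_img_id_index_alt (ids : List Int) : List (Int × List Int) :=
  (PySem.List.dedup ids).map
    (fun k => (k, ((PySem.List.enumerate ids).filter (fun p => p.2 == k)).map
      (fun p => p.1)))

-- ===== PRECONDITION & SPEC =====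
def Spec_gen_img_id_index (ids : List Int) (out : List (Int × List Int)) : Prop := out = gen_img_id_index_alt ids
instance (ids : List Int) (out : List (Int × List Int)) : Decidable (Spec_gen_img_id_index ids out) := by unfold Spec_gen_img_id_index; infer_instance

-- ===== CLAIM (what is proved, stated in full; the proofs are below) =====
def Claim_equal_gen_img_id_index : Prop := ∀ (ids : List Int), Dom_gen_img_id_index ids → Spec_gen_img_id_index ids (gen_img_id_index ids)

-- ===== LEMMAS AND PROOFS =====

-- A's grouping loop, with each (index, id) pair swapped to (id, index), is the key-first grouping fold
theorem grouping_foldl_swap (l : List (Int × Int)) :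
    l.foldl (fun d p => d.modify p.2 [] (fun t => t ++ [p.1])) PySem.Dict.empty =
    (l.map Prod.swap).foldl
      (fun d p => d.modify p.1 [] (fun t => t ++ [p.2])) PySem.Dict.empty := by
  simp [List.foldl_map, Prod.swap]

-- the value A's grouping fold assigns to key k: the indices paired with k, in list order
theorem grouping_getD (l : List (Int × Int)) (k : Int) :
    (l.foldl (fun d p => d.modify p.2 [] (fun t => t ++ [p.1]))
      PySem.Dict.empty).getD k [] =
    (l.filter (fun p => p.2 == k)).map (fun p => p.1) := by
  rw [grouping_foldl_swap,
    PySem.Dict.getD_foldl_modify_append (l.map Prod.swap) PySem.Dict.empty k]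
  simp only [PySem.Dict.getD_empty, List.nil_append, List.filter_map, List.map_map]
  rfl

-- ===== VERDICT (by name: the statement is the Claim_ definition above) =====
theorem gen_img_id_index_spec : Claim_equal_gen_img_id_index := by
  intro ids _
  unfold Spec_gen_img_id_index gen_img_id_index gen_img_id_index_alt
  set dA := (PySem.List.enumerate ids).foldl
    (fun d p => d.modify p.2 [] (fun t => t ++ [p.1])) PySem.Dict.empty with hdA
  have hnd : dA.keys.Nodup := by
    rw [hdA, grouping_foldl_swap]
    exact PySem.Dict.nodup_keys_foldl_modify_key _ Prod.fst []
      (fun _ p => fun t => t ++ [p.2]) PySem.Dict.empty (by simp [PySem.Dict.keys_empty])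
  have hkeys : dA.keys = PySem.Set.ofList ids := by
    rw [hdA, grouping_foldl_swap,
      PySem.Dict.keys_foldl_modify_key _ Prod.fst []
        (fun _ p => fun t => t ++ [p.2]) PySem.Dict.empty]
    simp only [PySem.Set.update, PySem.Set.ofList_eq_foldl, List.map_map,
      PySem.Dict.keys_empty]
    rw [show (Prod.fst ∘ Prod.swap : ℤ × ℤ → ℤ) = (fun x => x.2) from rfl,
      PySem.List.map_snd_enumerate]
  rw [PySem.Dict.items_eq_map_keys dA hnd [], hkeys]
  simp only [PySem.List.dedup_eq_ofList]
  refine List.map_congr_left (fun k _ => ?_)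
  rw [hdA, grouping_getD]
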